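-- pv_equiv track=rewrite | github.com/CastleRain/coding_test | backjoon/Z_진행중/(10844) 쉬운 계단 수.py | solution
-- ===== SOURCE A (Python) =====
-- MAX_NUM = 1000000000
--
-- def solution(n):
--     dp = [0] * (n+1)
--     dp[1] = 9
--     for i in range(2, n+1):
--         if i % 2 == 0:
--             dp[i] = (dp[i-1] * 2 - 1)
--         else:
--             dp[i] =( dp[i-1] * 2)
--
--     return dp[n]% MAX_NUM
-- ===== SOURCE B (Python) =====
-- MAX_NUM = 1000000000
--
-- def solution(n):
--     # closed form: dp[n] = 9*2^(n-1) - (2^n - c)/3 with c = 1 if n even else 2,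
--     # evaluated with fast modular exponentiation.
--     c = 1 if n % 2 == 0 else 2
--     g = (pow(2, n, 3 * MAX_NUM) - c) // 3
--     return (9 * pow(2, n - 1, MAX_NUM) - g) % MAX_NUM
-- ===== Notes on version B (the rewrite author's own statement) =====
-- stated objective: faster
-- what changed: Replaced the O(n)-step big-integer DP array (doubling a number that grows to n bits each step) by the closed form 9*2^(n-1) - (2^n - c)/3 evaluated with three-argument pow (fast modular exponentiation), keeping all arithmetic bounded by the modulus.
import Mathlib
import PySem

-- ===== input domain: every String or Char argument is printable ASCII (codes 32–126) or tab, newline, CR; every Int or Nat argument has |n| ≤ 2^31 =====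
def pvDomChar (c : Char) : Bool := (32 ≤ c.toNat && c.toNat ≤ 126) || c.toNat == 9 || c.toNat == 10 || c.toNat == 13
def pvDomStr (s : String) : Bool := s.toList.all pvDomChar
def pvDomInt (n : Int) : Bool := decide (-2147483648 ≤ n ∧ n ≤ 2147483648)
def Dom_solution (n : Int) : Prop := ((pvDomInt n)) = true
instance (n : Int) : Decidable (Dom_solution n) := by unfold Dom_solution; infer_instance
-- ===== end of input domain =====

-- B replaces A's n-step big-integer DP by the closed form 9*2^(n-1) - (2^n - c)/3
-- evaluated with fast modular exponentiation (objective: faster).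

-- ===== PORT A =====
def solution (n : Int) : Int :=
  let dp : List Int := ((List.replicate (n + 1).toNat 0 : List Int)).set 1 9
  let dp := (PySem.List.pyRange 2 (n + 1) 1).foldl
    (fun dp i =>
      if PySem.Int.mod i 2 == 0 then
        dp.set i.toNat (PySem.List.pyGetD dp (i - 1) 0 * 2 - 1)
      else
        dp.set i.toNat (PySem.List.pyGetD dp (i - 1) 0 * 2)) dp
  PySem.Int.mod (PySem.List.pyGetD dp n 0) 1000000000

-- ===== PORT B =====
-- fast modular exponentiation: port of Python's built-in three-argument pow(b, e, m)
def pvPowMod (b : Int) (e : Nat) (m : Int) : Int :=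
  if e = 0 then PySem.Int.mod 1 m
  else
    let h := pvPowMod b (e / 2) m
    let h2 := PySem.Int.mod (h * h) m
    if e % 2 = 0 then h2 else PySem.Int.mod (h2 * b) m
decreasing_by exact Nat.div_lt_self (Nat.pos_of_ne_zero (by assumption)) (by norm_num)

def solution_alt (n : Int) : Int :=
  let c : Int := if PySem.Int.mod n 2 == 0 then 1 else 2
  let g := PySem.Int.floordiv (pvPowMod 2 n.toNat 3000000000 - c) 3
  PySem.Int.mod (9 * pvPowMod 2 (n - 1).toNat 1000000000 - g) 1000000000

-- ===== PRECONDITION & SPEC =====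
-- A raises IndexError for every n ≤ 0 (dp[1] = 9 on a list of length ≤ 1); Pre_ excludes exactly those inputs.
def Pre_solution (n : Int) : Prop := 1 ≤ n
instance (n : Int) : Decidable (Pre_solution n) := by unfold Pre_solution; infer_instance
def pvWitness_solution : Int := 5

def Spec_solution (n : Int) (out : Int) : Prop := out = solution_alt n
instance (n : Int) (out : Int) : Decidable (Spec_solution n out) := by unfold Spec_solution; infer_instance

-- ===== CLAIM (what is proved, stated in full; the proofs are below) =====
def Claim_equal_solution : Prop := ∀ (n : Int), Dom_solution n → Pre_solution n → Spec_solution n (solution n)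

-- ===== LEMMAS AND PROOFS =====

-- the DP value dp[k] as a function of the index k
def pvF : Nat → Int
  | 0 => 0
  | 1 => 9
  | (k + 2) => if (k + 2) % 2 = 0 then pvF (k + 1) * 2 - 1 else pvF (k + 1) * 2

theorem pvF_closed (k : Nat) :
    3 * pvF (k + 1) = 27 * 2 ^ k - 2 ^ (k + 1) + (if (k + 1) % 2 = 0 then 1 else 2) := by
  induction k with
  | zero => norm_num [pvF]
  | succ k ih =>
    have h1 : (2:Int) ^ (k + 1) = 2 * 2 ^ k := by ring
    have h2 : (2:Int) ^ (k + 2) = 2 * 2 ^ (k + 1) := by ring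
    rcases Nat.mod_two_eq_zero_or_one k with hk | hk
    · have e1 : (k + 2) % 2 = 0 := by omega
      have e2 : (k + 1) % 2 = 1 := by omega
      rw [e2] at ih
      show 3 * pvF (k + 2) = _
      rw [pvF, e1]
      norm_num at ih ⊢
      linarith
    · have e1 : (k + 2) % 2 = 1 := by omega
      have e2 : (k + 1) % 2 = 0 := by omega
      rw [e2] at ih
      show 3 * pvF (k + 2) = _
      rw [pvF, e1]
      norm_num at ih ⊢
      linarith

theorem pvPowMod_correct (b : Int) (e : Nat) (m : Int) (hm : 0 < m) :
    pvPowMod b e m = (b ^ e) % m := by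
  induction e using Nat.strong_induction_on with
  | _ e ih =>
    rw [pvPowMod]
    by_cases h0 : e = 0
    · simp [h0, PySem.Int.mod_eq_emod_of_pos hm]
    · have ihh := ih (e / 2) (Nat.div_lt_self (Nat.pos_of_ne_zero h0) one_lt_two)
      simp only [h0, if_false, PySem.Int.mod_eq_emod_of_pos hm, ihh]
      have hsplit : b ^ e = b ^ (e / 2) * b ^ (e / 2) * b ^ (e % 2) := by
        rw [← pow_add, ← pow_add]
        congr 1
        omega
      rcases Nat.mod_two_eq_zero_or_one e with he | he
      · rw [he, if_pos rfl, hsplit, he, pow_zero, mul_one]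
        conv_rhs => rw [Int.mul_emod]
      · rw [he, if_neg (by omega), hsplit, he, pow_one]
        conv_rhs => rw [Int.mul_emod, Int.mul_emod (b ^ (e / 2)) (b ^ (e / 2))]
        conv_lhs => rw [Int.mul_emod]
        simp [Int.emod_emod_of_dvd _ (dvd_refl m)]

-- loop invariant of A's fold: after the steps 2..m+1 the list has unchanged length
-- and its entry m+1 holds pvF (m+1)
theorem pv_loop (N : Nat) (hN : 2 ≤ N) : ∀ m : Nat, m + 2 ≤ N →
    ((PySem.List.pyRange 2 (2 + (m : Int)) 1).foldl
      (fun dp i =>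
        if PySem.Int.mod i 2 == 0 then
          dp.set i.toNat (PySem.List.pyGetD dp (i - 1) 0 * 2 - 1)
        else
          dp.set i.toNat (PySem.List.pyGetD dp (i - 1) 0 * 2))
      (((List.replicate N 0 : List Int)).set 1 9)).length = N ∧
    PySem.List.pyGetD ((PySem.List.pyRange 2 (2 + (m : Int)) 1).foldl
      (fun dp i =>
        if PySem.Int.mod i 2 == 0 then
          dp.set i.toNat (PySem.List.pyGetD dp (i - 1) 0 * 2 - 1)
        else
          dp.set i.toNat (PySem.List.pyGetD dp (i - 1) 0 * 2))
      (((List.replicate N 0 : List Int)).set 1 9)) ((m : Int) + 1) 0 = pvF (m + 1) := by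
  intro m
  induction m with
  | zero =>
    intro hm
    rw [show ((2:Int) + (0:Nat) = 2) by norm_num, PySem.List.pyRange_one_eq_nil le_rfl]
    simp only [List.foldl_nil]
    constructor
    · simp
    · rw [show ((0:Nat):Int) + 1 = ((1:Nat):Int) by norm_num, PySem.List.pyGetD_natCast]
      have h1 : 1 < ((List.replicate N 0 : List Int)).length := by simp; omega
      simp [List.getD, List.getElem?_set_self h1, pvF]
  | succ m ih =>
    intro hm
    have ih' := ih (by omega)
    obtain ⟨hlen, hval⟩ := ih'
    rw [show ((2:Int) + ((m+1 : Nat)) = (2 + (m:Int)) + 1) by push_cast; ring,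
        PySem.List.pyRange_one_succ_right (by omega), List.foldl_append]
    set st := (PySem.List.pyRange 2 (2 + (m : Int)) 1).foldl
      (fun dp i =>
        if PySem.Int.mod i 2 == 0 then
          dp.set i.toNat (PySem.List.pyGetD dp (i - 1) 0 * 2 - 1)
        else
          dp.set i.toNat (PySem.List.pyGetD dp (i - 1) 0 * 2))
      (((List.replicate N 0 : List Int)).set 1 9) with hst
    simp only [List.foldl_cons, List.foldl_nil]
    have hsub : (2 + (m:Int)) - 1 = ((m : Int) + 1) := by ring
    have htn : (2 + (m:Int)).toNat = m + 2 := by omega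
    have hlt : m + 2 < st.length := by omega
    have hmod : PySem.Int.mod (2 + (m:Int)) 2 = (((m + 2) % 2 : Nat) : Int) := by
      rw [show (2 + (m:Int)) = ((m + 2 : Nat) : Int) by push_cast; ring]
      exact_mod_cast PySem.Int.mod_natCast (m + 2) 2
    have hget : ∀ v : Int, PySem.List.pyGetD (st.set (m + 2) v) ((m:Int) + 1 + 1) 0 = v := by
      intro v
      rw [show ((m:Int) + 1 + 1) = ((m + 2 : Nat) : Int) by push_cast; ring,
          PySem.List.pyGetD_natCast]
      simp [List.getD, List.getElem?_set_self hlt]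
    rcases Nat.mod_two_eq_zero_or_one (m + 2) with he | he
    · rw [hmod, he]
      simp only [Nat.cast_zero, BEq.rfl, if_true, htn, hsub, hval]
      refine ⟨by simp [hlen], ?_⟩
      rw [show ((m+1:Nat):Int) + 1 = (m:Int) + 1 + 1 by push_cast; ring, hget, pvF, if_pos he]
    · rw [hmod, he]
      simp only [Nat.cast_one, htn, hsub, hval]
      rw [if_neg (by decide)]
      refine ⟨by simp [hlen], ?_⟩
      rw [show ((m+1:Nat):Int) + 1 = (m:Int) + 1 + 1 by push_cast; ring, hget, pvF, if_neg (by omega)]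

theorem solution_eq_f (n : Int) (hn : 1 ≤ n) :
    solution n = pvF n.toNat % 1000000000 := by
  obtain ⟨m, hm⟩ : ∃ m : Nat, n = ((m + 1 : Nat) : Int) := ⟨n.toNat - 1, by omega⟩
  subst hm
  simp only [solution]
  rw [show ((m + 1 : Nat) : Int) + 1 = 2 + (m : Int) by push_cast; ring]
  rw [show (2 + (m : Int)).toNat = m + 2 by omega]
  obtain ⟨hlen, hval⟩ := pv_loop (m + 2) (by omega) m (by omega)
  rw [show ((m + 1 : Nat) : Int) = (m : Int) + 1 by push_cast; ring]
  rw [hval, PySem.Int.mod_eq_emod_of_pos (by norm_num : (0:Int) < 1000000000),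
      show ((m : Int) + 1).toNat = m + 1 by omega]

theorem solution_alt_eq_f (n : Int) (hn : 1 ≤ n) :
    solution_alt n = pvF n.toNat % 1000000000 := by
  obtain ⟨m, hm⟩ : ∃ m : Nat, n = ((m + 1 : Nat) : Int) := ⟨n.toNat - 1, by omega⟩
  subst hm
  simp only [solution_alt]
  rw [show ((m + 1 : Nat) : Int).toNat = m + 1 by omega,
      show (((m + 1 : Nat) : Int) - 1).toNat = m by omega,
      pvPowMod_correct 2 (m + 1) 3000000000 (by norm_num),
      pvPowMod_correct 2 m 1000000000 (by norm_num),
      show PySem.Int.mod ((m + 1 : Nat) : Int) 2 = (((m + 1) % 2 : Nat) : Int) from by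
        exact_mod_cast PySem.Int.mod_natCast (m + 1) 2,
      PySem.Int.floordiv_eq_ediv_of_pos (by norm_num : (0:Int) < 3),
      PySem.Int.mod_eq_emod_of_pos (by norm_num : (0:Int) < 1000000000)]
  set c : Int := if ((((m + 1) % 2 : Nat) : Int) == 0) then 1 else 2 with hc
  have hcc : c = (if (m + 1) % 2 = 0 then (1:Int) else 2) := by
    rcases Nat.mod_two_eq_zero_or_one (m + 1) with h | h <;> simp [hc, h]
  have hid := pvF_closed m
  have hq : (2:Int) ^ (m + 1) % 3000000000
      = 2 ^ (m + 1) - 3000000000 * ((2:Int) ^ (m + 1) / 3000000000) := Int.emod_def _ _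
  have hr : (2:Int) ^ m % 1000000000
      = 2 ^ m - 1000000000 * ((2:Int) ^ m / 1000000000) := Int.emod_def _ _
  set q := (2:Int) ^ (m + 1) / 3000000000 with hqd
  set r := (2:Int) ^ m / 1000000000 with hrd
  have hg : ((2:Int) ^ (m + 1) % 3000000000 - c) / 3
      = 9 * 2 ^ m - pvF (m + 1) - 1000000000 * q := by
    rw [hq, hcc]
    have h3 : (2:Int) ^ (m + 1) - 3000000000 * q - (if (m + 1) % 2 = 0 then (1:Int) else 2)
        = 3 * (9 * 2 ^ m - pvF (m + 1) - 1000000000 * q) := by linarith [hid]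
    rw [h3, Int.mul_ediv_cancel_left _ (by norm_num : (3:Int) ≠ 0)]
  rw [hg, hr]
  have hfin : (9 * ((2:Int) ^ m - 1000000000 * r) - (9 * 2 ^ m - pvF (m + 1) - 1000000000 * q))
      = pvF (m + 1) + 1000000000 * (q - 9 * r) := by ring
  rw [hfin, Int.add_mul_emod_self_left]

-- ===== VERDICT (by name: the statement is the Claim_ definition above) =====
theorem solution_spec : Claim_equal_solution := by
  intro n _ hpre
  unfold Spec_solution
  rw [solution_eq_f n hpre, solution_alt_eq_f n hpre]
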